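-- pv_equiv track=rewrite | github.com/g1776/CV-BAGLE | src/features/extraction/eval.py | clean_labels
-- ===== SOURCE A (Python) =====
-- def clean_labels(labels):
--     clean = []
--     for label in labels:
--         if label != None:
--
--             # tokenize by spaces
--             words = label.split(" ")
--
--             # remove special characters  and empty strings
--             words_clean = [''.join(c for c in word if c.isalnum()) for word in words]
--             words_clean = [word for word in words_clean if len(word) > 0]
--
--             # make all words lowercase
--             words_clean = [word.lower() for word in words_clean]
--
--             # add to cumulative list
--             clean.extend(words_clean)
--     return clean
-- ===== SOURCE B (Python) =====
-- def clean_labels(labels):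
--     clean = []
--     for label in labels:
--         if label is None:
--             continue
--         # single pass over the label's characters: build the current token
--         # (already lowercased, non-alphanumerics skipped), emit on space
--         tok = []
--         for c in label:
--             if c == ' ':
--                 if tok:
--                     clean.append(''.join(tok))
--                     tok = []
--             elif c.isalnum():
--                 tok.append(c.lower())
--         if tok:
--             clean.append(''.join(tok))
--     return clean
-- ===== Notes on version B (the rewrite author's own statement) =====
-- stated objective: alternative
-- what changed: A splits each label on spaces then cleans, filters and lowercases the tokens in three further list passes; B makes a single character pass per label, building the current token already lowercased with non-alphanumerics skipped and emitting it on a space or at the end, with no intermediate token lists.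
import Mathlib
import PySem

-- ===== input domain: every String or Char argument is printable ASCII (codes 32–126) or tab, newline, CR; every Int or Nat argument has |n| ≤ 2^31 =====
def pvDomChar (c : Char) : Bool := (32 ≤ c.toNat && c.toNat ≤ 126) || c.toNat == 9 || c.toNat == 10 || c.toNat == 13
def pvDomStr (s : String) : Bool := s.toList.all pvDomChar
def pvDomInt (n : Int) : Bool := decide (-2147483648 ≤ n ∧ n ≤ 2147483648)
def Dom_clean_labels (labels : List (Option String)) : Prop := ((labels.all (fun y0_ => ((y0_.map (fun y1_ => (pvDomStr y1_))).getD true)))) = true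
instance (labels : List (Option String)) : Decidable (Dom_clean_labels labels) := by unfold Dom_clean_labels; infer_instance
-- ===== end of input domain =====

-- B replaces A's split-then-clean-per-token pipeline by a single character pass per label
-- (skip non-alphanumerics, lowercase as it goes, emit the token on space/end); return value only, no mutation.

-- ===== PORT A =====
-- label.split(" ") ported via PySem.Chars.splitOn on the code points (exact: the separator " " is nonempty);
-- tokens are kept as List Char through the pipeline and turned into String when appended, value for value.
def clean_labels (labels : List (Option String)) : List String :=
  labels.foldl (fun clean label =>
    match label with
    | none => clean
    | some l =>
      let words := PySem.Chars.splitOn l.toList [' ']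
      let words_clean := words.map (fun word => word.filter (fun c => PySem.Chars.isalnum c))
      let words_clean2 := words_clean.filter (fun word => word.length > 0)
      let words_clean3 := words_clean2.map (fun word => PySem.Chars.lower word)
      clean ++ words_clean3.map String.ofList) []

-- ===== PORT B =====
-- the inner character loop of Source B: tok is the current token (lowered, alnum-only, in order)
def cleanScan : List Char → List Char → List String → List String
  | [], tok, out => if tok.isEmpty then out else out ++ [String.ofList tok]
  | c :: rest, tok, out =>
    if c = ' ' then
      if tok.isEmpty then cleanScan rest tok out
      else cleanScan rest [] (out ++ [String.ofList tok])
    else if PySem.Chars.isalnum c then cleanScan rest (tok ++ [PySem.Chars.lowerChar c]) out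
    else cleanScan rest tok out

def clean_labels_alt (labels : List (Option String)) : List String :=
  labels.foldl (fun clean label =>
    match label with
    | none => clean
    | some l => cleanScan l.toList [] clean) []

-- ===== PRECONDITION & SPEC =====
def Spec_clean_labels (labels : List (Option String)) (out : List String) : Prop := out = clean_labels_alt labels
instance (labels : List (Option String)) (out : List String) : Decidable (Spec_clean_labels labels out) := by unfold Spec_clean_labels; infer_instance

-- ===== CLAIM (what is proved, stated in full; the proofs are below) =====
def Claim_equal_clean_labels : Prop := ∀ (labels : List (Option String)), Dom_clean_labels labels → Spec_clean_labels labels (clean_labels labels)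

-- ===== LEMMAS AND PROOFS =====

-- the segments of a char list split on a single space, carried with the prefix of the current segment
def segs : List Char → List Char → List (List Char)
  | [], pre => [pre]
  | c :: r, pre => if c = ' ' then pre :: segs r [] else segs r (pre ++ [c])

lemma go_space_cons (f : Nat) (c : Char) (r cur : List Char) (acc : List (List Char)) :
    PySem.Chars.splitOn.go [' '] (f+1) (c :: r) cur acc =
      (if c = ' ' then PySem.Chars.splitOn.go [' '] f r [] (cur.reverse :: acc)
       else PySem.Chars.splitOn.go [' '] f r (c :: cur) acc) := by
  simp only [PySem.Chars.splitOn.go, List.isPrefixOf, Bool.and_true]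
  by_cases h : c = ' '
  · simp [h]
  · simp [h]
    intro hc; exact absurd hc.symm h

lemma go_space_nil (f : Nat) (cur : List Char) (acc : List (List Char)) :
    PySem.Chars.splitOn.go [' '] f [] cur acc = acc.reverse ++ [cur.reverse] := by
  cases f <;> simp [PySem.Chars.splitOn.go]

lemma go_space_eq_segs (l : List Char) : ∀ (f : Nat) (cur : List Char) (acc : List (List Char)),
    l.length ≤ f →
    PySem.Chars.splitOn.go [' '] f l cur acc = acc.reverse ++ segs l cur.reverse := by
  induction l with
  | nil => intro f cur acc _; simpa [segs] using go_space_nil f cur acc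
  | cons c r ih =>
    intro f cur acc hf
    cases f with
    | zero => simp at hf
    | succ f =>
      rw [go_space_cons]
      by_cases h : c = ' '
      · simp only [h, segs, ih f [] _ (by simpa using hf)]
        simp
      · simp only [segs, ih f (c :: cur) acc (by simpa using hf), if_neg h]
        simp

lemma splitOn_space (l : List Char) : PySem.Chars.splitOn l [' '] = segs l [] := by
  simpa using go_space_eq_segs l (l.length + 1) [] [] (by omega)

-- the cleaned form of a raw segment
def cleanW (w : List Char) : List Char := PySem.Chars.lower (w.filter (fun c => PySem.Chars.isalnum c))

lemma cleanW_append_alnum (pre : List Char) (c : Char) (h : PySem.Chars.isalnum c = true) :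
    cleanW (pre ++ [c]) = cleanW pre ++ [PySem.Chars.lowerChar c] := by
  simp [cleanW, PySem.Chars.lower, h]

lemma cleanW_append_not_alnum (pre : List Char) (c : Char) (h : PySem.Chars.isalnum c = false) :
    cleanW (pre ++ [c]) = cleanW pre := by
  simp [cleanW, PySem.Chars.lower, h]

lemma cleanScan_segs (l : List Char) : ∀ (pre : List Char) (out : List String),
    cleanScan l (cleanW pre) out =
      out ++ (((segs l pre).map cleanW).filter (fun w => !w.isEmpty)).map String.ofList := by
  induction l with
  | nil =>
    intro pre out
    by_cases h : cleanW pre = [] <;> simp [cleanScan, segs, h]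
  | cons c r ih =>
    intro pre out
    by_cases hsp : c = ' '
    · by_cases h : cleanW pre = []
      · simp only [cleanScan, if_pos hsp, h, List.isEmpty_nil]
        rw [show ([] : List Char) = cleanW [] from rfl, ih [] out]
        simp [segs, hsp, h]
      · have hne : (cleanW pre).isEmpty = false := by simpa using h
        have step : cleanScan (c :: r) (cleanW pre) out
            = cleanScan r [] (out ++ [String.ofList (cleanW pre)]) := by
          simp [cleanScan, hsp, hne]
        rw [step, show ([] : List Char) = cleanW [] from rfl, ih [] (out ++ [String.ofList (cleanW pre)])]
        simp [segs, hsp, h]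
    · by_cases ha : PySem.Chars.isalnum c = true
      · simp only [cleanScan, if_neg hsp, if_pos ha]
        rw [← cleanW_append_alnum pre c ha, ih (pre ++ [c]) out]
        simp [segs, hsp]
      · simp only [cleanScan, if_neg hsp, if_neg ha]
        rw [show cleanW pre = cleanW (pre ++ [c]) from
          (cleanW_append_not_alnum pre c (by simpa using ha)).symm, ih (pre ++ [c]) out]
        simp [segs, hsp]

-- A's three-stage pipeline over the segments equals the single cleaned-filtered pass
lemma pipeline_eq (S : List (List Char)) :
    ((S.map (fun w => w.filter (fun c => PySem.Chars.isalnum c))).filter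
        (fun w => w.length > 0)).map (fun w => PySem.Chars.lower w) =
      (S.map cleanW).filter (fun w => !w.isEmpty) := by
  induction S with
  | nil => rfl
  | cons w S ih =>
    by_cases h : (w.filter (fun c => PySem.Chars.isalnum c)).length > 0
    · have h2 : (cleanW w).isEmpty = false := by
        simp only [cleanW, PySem.Chars.lower, List.isEmpty_eq_false_iff, ← List.length_pos_iff,
          List.length_map]
        omega
      have h2' : (!(PySem.Chars.lower (w.filter (fun c => PySem.Chars.isalnum c))).isEmpty) = true := by
        simpa [cleanW] using h2
      simp [h, ih, h2', cleanW]
    · have h0 : w.filter (fun c => PySem.Chars.isalnum c) = [] :=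
        List.length_eq_zero_iff.mp (by omega)
      have h2 : cleanW w = [] := by simp [cleanW, h0, PySem.Chars.lower]
      simp [h, h2, ih]

lemma per_label (l : List Char) (out : List String) :
    cleanScan l [] out =
      out ++ ((((PySem.Chars.splitOn l [' ']).map (fun w => w.filter (fun c => PySem.Chars.isalnum c))).filter
        (fun w => w.length > 0)).map (fun w => PySem.Chars.lower w)).map String.ofList := by
  rw [splitOn_space, pipeline_eq]
  have := cleanScan_segs l [] out
  simpa [cleanW, PySem.Chars.lower] using this

lemma folds_eq (labels : List (Option String)) : ∀ (acc : List String),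
    labels.foldl (fun clean label =>
      match label with
      | none => clean
      | some l =>
        let words := PySem.Chars.splitOn l.toList [' ']
        let words_clean := words.map (fun word => word.filter (fun c => PySem.Chars.isalnum c))
        let words_clean2 := words_clean.filter (fun word => word.length > 0)
        let words_clean3 := words_clean2.map (fun word => PySem.Chars.lower word)
        clean ++ words_clean3.map String.ofList) acc =
    labels.foldl (fun clean label =>
      match label with
      | none => clean
      | some l => cleanScan l.toList [] clean) acc := by
  induction labels with
  | nil => intro acc; rfl
  | cons lab rest ih =>
    intro acc
    cases lab with
    | none => exact ih acc
    | some l =>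
      simp only [List.foldl_cons]
      rw [ih, per_label]

-- ===== VERDICT (by name: the statement is the Claim_ definition above) =====
theorem clean_labels_spec : Claim_equal_clean_labels := by
  intro labels _
  unfold Spec_clean_labels clean_labels clean_labels_alt
  exact folds_eq labels []
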